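-- pv_equiv track=rewrite | github.com/FatimahAbdallah/Ps5 | PS5..py | nearly_equal
-- ===== SOURCE A (Python) =====
-- def nearly_equal(s1, s2):
--     def letter_count(s):
--         table = {}
--         for c in s:
--             c = c.lower()
--             if 'a' <= c <= 'z':
--                 table[c] = table.get(c, 0) + 1
--         return table
--
--     d1 = letter_count(s1)
--     d2 = letter_count(s2)
--
--     checked = []
--     for ch in d1:
--         if ch not in checked:
--             checked.append(ch)
--     for ch in d2:
--         if ch not in checked:
--             checked.append(ch)
--
--     for ch in checked:
--         val1 = d1.get(ch, 0)
--         val2 = d2.get(ch, 0)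
--         if abs(val1 - val2) > 2:
--             return False
--     return True
-- ===== SOURCE B (Python) =====
-- def nearly_equal(s1, s2):
--     delta = {}
--     for c in s1:
--         c = c.lower()
--         if 'a' <= c <= 'z':
--             delta[c] = delta.get(c, 0) + 1
--     for c in s2:
--         c = c.lower()
--         if 'a' <= c <= 'z':
--             delta[c] = delta.get(c, 0) - 1
--     return all(abs(v) <= 2 for v in delta.values())
-- ===== Notes on version B (the rewrite author's own statement) =====
-- stated objective: simpler
-- what changed: Replaces A's two per-string count dicts plus an explicitly built key-union list with a single signed-difference dict updated in both loops, finishing with one pass over its values.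
import Mathlib
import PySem

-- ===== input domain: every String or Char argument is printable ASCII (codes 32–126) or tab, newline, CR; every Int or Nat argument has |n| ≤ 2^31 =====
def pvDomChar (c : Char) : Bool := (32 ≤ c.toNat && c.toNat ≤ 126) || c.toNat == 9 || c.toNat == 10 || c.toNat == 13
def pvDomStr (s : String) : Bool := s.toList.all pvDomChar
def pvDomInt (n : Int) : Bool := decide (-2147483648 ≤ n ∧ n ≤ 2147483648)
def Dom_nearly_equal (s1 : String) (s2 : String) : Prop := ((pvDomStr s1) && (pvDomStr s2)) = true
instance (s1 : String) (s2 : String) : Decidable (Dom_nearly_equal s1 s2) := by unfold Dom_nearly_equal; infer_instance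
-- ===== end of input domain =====

-- B keeps one signed-difference dict instead of A's two count dicts plus a key-union list (objective: simpler).

-- ===== PORT A =====
-- inner helper letter_count(s)
def pvLetterCount (s : String) : PySem.Dict Char Int :=
  s.toList.foldl (fun table c0 =>
    let c := PySem.Chars.lowerChar c0
    if 'a' ≤ c ∧ c ≤ 'z' then table.insert c (table.getD c 0 + 1) else table)
    PySem.Dict.empty

-- A's final for-loop with its early 'return False'
def pvCheckLoop (d1 d2 : PySem.Dict Char Int) : List Char → Bool
  | [] => true
  | ch :: rest =>
    if 2 < |d1.getD ch 0 - d2.getD ch 0| then false else pvCheckLoop d1 d2 rest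

def nearly_equal (s1 : String) (s2 : String) : Bool :=
  let d1 := pvLetterCount s1
  let d2 := pvLetterCount s2
  let checked := d1.keys.foldl
    (fun checked ch => if checked.contains ch then checked else checked ++ [ch]) ([] : List Char)
  let checked := d2.keys.foldl
    (fun checked ch => if checked.contains ch then checked else checked ++ [ch]) checked
  pvCheckLoop d1 d2 checked

-- ===== PORT B =====
def nearly_equal_alt (s1 : String) (s2 : String) : Bool :=
  let delta := s1.toList.foldl (fun d c0 =>
    let c := PySem.Chars.lowerChar c0
    if 'a' ≤ c ∧ c ≤ 'z' then d.insert c (d.getD c 0 + 1) else d)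
    (PySem.Dict.empty : PySem.Dict Char Int)
  let delta := s2.toList.foldl (fun d c0 =>
    let c := PySem.Chars.lowerChar c0
    if 'a' ≤ c ∧ c ≤ 'z' then d.insert c (d.getD c 0 - 1) else d) delta
  delta.values.all (fun v => |v| ≤ 2)

-- ===== PRECONDITION & SPEC =====
def Spec_nearly_equal (s1 : String) (s2 : String) (out : Bool) : Prop := out = nearly_equal_alt s1 s2
instance (s1 : String) (s2 : String) (out : Bool) : Decidable (Spec_nearly_equal s1 s2 out) := by unfold Spec_nearly_equal; infer_instance

-- ===== CLAIM (what is proved, stated in full; the proofs are below) =====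
def Claim_equal_nearly_equal : Prop := ∀ (s1 : String) (s2 : String), Dom_nearly_equal s1 s2 → Spec_nearly_equal s1 s2 (nearly_equal s1 s2)

-- ===== LEMMAS AND PROOFS =====

-- the lowered-and-filtered letter stream both programs count
def pvFL (s : String) : List Char :=
  (s.toList.map PySem.Chars.lowerChar).filter (fun c => decide ('a' ≤ c ∧ c ≤ 'z'))

-- a 'lower then keep letters then f' loop is f folded over the filtered stream
theorem pvFoldFilter (f : PySem.Dict Char Int → Char → PySem.Dict Char Int)
    (l : List Char) (d : PySem.Dict Char Int) :
    l.foldl (fun d c0 =>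
        let c := PySem.Chars.lowerChar c0
        if 'a' ≤ c ∧ c ≤ 'z' then f d c else d) d
      = ((l.map PySem.Chars.lowerChar).filter (fun c => decide ('a' ≤ c ∧ c ≤ 'z'))).foldl f d := by
  induction l generalizing d with
  | nil => rfl
  | cons x t ih =>
    simp only [List.foldl_cons, List.map_cons, List.filter_cons]
    by_cases h : 'a' ≤ PySem.Chars.lowerChar x ∧ PySem.Chars.lowerChar x ≤ 'z' <;>
      simp [h, ih]

theorem pvAddLoop_eq (l : List Char) (d : PySem.Dict Char Int) :
    l.foldl (fun d c0 =>
        let c := PySem.Chars.lowerChar c0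
        if 'a' ≤ c ∧ c ≤ 'z' then d.insert c (d.getD c 0 + 1) else d) d
      = ((l.map PySem.Chars.lowerChar).filter (fun c => decide ('a' ≤ c ∧ c ≤ 'z'))).foldl
          (fun d c => d.insert c (d.getD c 0 + 1)) d :=
  pvFoldFilter (fun d c => d.insert c (d.getD c 0 + 1)) l d

theorem pvSubLoop_eq (l : List Char) (d : PySem.Dict Char Int) :
    l.foldl (fun d c0 =>
        let c := PySem.Chars.lowerChar c0
        if 'a' ≤ c ∧ c ≤ 'z' then d.insert c (d.getD c 0 - 1) else d) d
      = ((l.map PySem.Chars.lowerChar).filter (fun c => decide ('a' ≤ c ∧ c ≤ 'z'))).foldl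
          (fun d c => d.insert c (d.getD c 0 - 1)) d :=
  pvFoldFilter (fun d c => d.insert c (d.getD c 0 - 1)) l d

theorem pvFL_def (s : String) :
    (s.toList.map PySem.Chars.lowerChar).filter (fun c => decide ('a' ≤ c ∧ c ≤ 'z')) = pvFL s := rfl

theorem pvLetterCount_eq (s : String) :
    pvLetterCount s = (pvFL s).foldl (fun d c => d.insert c (d.getD c 0 + 1)) PySem.Dict.empty := by
  unfold pvLetterCount
  rw [pvAddLoop_eq, pvFL_def]

theorem pvLetterCount_getD (s : String) (c : Char) :
    (pvLetterCount s).getD c 0 = ((pvFL s).count c : Int) := by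
  rw [pvLetterCount_eq, PySem.Dict.getD_foldl_insert_add_one]
  simp

theorem pvLetterCount_keys (s : String) :
    (pvLetterCount s).keys = PySem.Set.ofList (pvFL s) := by
  rw [pvLetterCount_eq, PySem.Dict.keys_foldl_insert]
  simp [PySem.Set.update_nil_left]

theorem getD_foldl_insert_sub_one (l : List Char) (d : PySem.Dict Char Int) (v : Char) :
    (l.foldl (fun d x => d.insert x (d.getD x 0 - 1)) d).getD v 0 = d.getD v 0 - l.count v := by
  induction l generalizing d with
  | nil => simp
  | cons x t ih =>
    rw [List.foldl_cons, ih, PySem.Dict.getD_insert, List.count_cons]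
    by_cases h : v = x
    · simp [h]; ring
    · simp [h, Ne.symm h]

theorem pvCheckLoop_eq_all (d1 d2 : PySem.Dict Char Int) (l : List Char) :
    pvCheckLoop d1 d2 l = l.all (fun ch => decide (|d1.getD ch 0 - d2.getD ch 0| ≤ 2)) := by
  induction l with
  | nil => rfl
  | cons x t ih =>
    rw [pvCheckLoop, ih, List.all_cons]
    split_ifs with h
    · simp [show ¬ (|d1.getD x 0 - d2.getD x 0| ≤ 2) from by omega]
    · simp [show |d1.getD x 0 - d2.getD x 0| ≤ 2 from by omega]

theorem pvAll_eq_of_mem_iff {l1 l2 : List Char} (p : Char → Bool)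
    (h : ∀ x, x ∈ l1 ↔ x ∈ l2) : l1.all p = l2.all p := by
  rw [Bool.eq_iff_iff, List.all_eq_true, List.all_eq_true]
  exact ⟨fun ha x hx => ha x ((h x).mpr hx), fun ha x hx => ha x ((h x).mp hx)⟩

-- ===== VERDICT (by name: the statement is the Claim_ definition above) =====
theorem nearly_equal_spec : Claim_equal_nearly_equal := by
  intro s1 s2 _
  unfold Spec_nearly_equal nearly_equal nearly_equal_alt
  dsimp only
  rw [pvAddLoop_eq, pvSubLoop_eq, pvFL_def, pvFL_def]
  -- B's accumulated dict
  set d0 := (pvFL s1).foldl (fun d c => d.insert c (d.getD c 0 + 1))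
      (PySem.Dict.empty : PySem.Dict Char Int) with hd0
  set delta := (pvFL s2).foldl (fun d x => d.insert x (d.getD x 0 - 1)) d0 with hδdef
  have hδ : ∀ c, delta.getD c 0 = ((pvFL s1).count c : Int) - ((pvFL s2).count c : Int) := by
    intro c
    rw [hδdef, getD_foldl_insert_sub_one, hd0, PySem.Dict.getD_foldl_insert_add_one]
    simp
  have hnodup : delta.keys.Nodup := by
    rw [hδdef, hd0]
    exact PySem.Dict.nodup_keys_foldl_insert _ _ _
      (PySem.Dict.nodup_keys_foldl_insert _ _ _ (by simp))
  have hkδ : ∀ x, x ∈ delta.keys ↔ x ∈ pvFL s1 ∨ x ∈ pvFL s2 := by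
    intro x
    rw [hδdef, PySem.Dict.keys_foldl_insert, hd0, PySem.Dict.keys_foldl_insert]
    simp [PySem.Set.mem_update, PySem.Set.mem_ofList, PySem.Set.update_nil_left,
      PySem.Dict.keys_empty]
  -- A's checked list is a set union of the two key lists
  have hchecked : ∀ x,
      x ∈ (pvLetterCount s2).keys.foldl
            (fun checked ch => if checked.contains ch then checked else checked ++ [ch])
            ((pvLetterCount s1).keys.foldl
              (fun checked ch => if checked.contains ch then checked else checked ++ [ch])
              ([] : List Char))
        ↔ x ∈ pvFL s1 ∨ x ∈ pvFL s2 := by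
    intro x
    show x ∈ PySem.Set.update (PySem.Set.update ([] : List Char)
        (pvLetterCount s1).keys) (pvLetterCount s2).keys ↔ _
    rw [PySem.Set.mem_update, PySem.Set.mem_update, pvLetterCount_keys,
      pvLetterCount_keys, PySem.Set.mem_ofList, PySem.Set.mem_ofList]
    simp
  -- both sides are an 'all' of the same predicate over membership-equal lists
  rw [pvCheckLoop_eq_all,
    PySem.Dict.values_eq_map_keys delta hnodup 0, List.all_map]
  simp only [pvLetterCount_getD, hδ]
  exact pvAll_eq_of_mem_iff _ (fun x => (hchecked x).trans (hkδ x).symm)
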